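-- pv_equiv track=rewrite | github.com/HPC-21020/tetris | tetris2.py | render_queue_shapes
-- ===== SOURCE A (Python) =====
-- def render_queue_shapes(shape_queue):
--     """
--     Create the visual display for the next pieces queue.
--     shape_queue: list of upcoming piece types
--     Returns: list of strings, each representing one line of the queue display
--     """
--     display_lines = []
--     for display_y in range(HEIGHT):
--         line = ""
--         if display_y == 0:
--             line = "    NEXT    "
--         elif 1 <= display_y <= 14:
--             queue_index = (display_y - 1) // 5
--             local_y = (display_y - 1) % 5
--             if queue_index < len(shape_queue):
--                 shape = shape_queue[queue_index]
--                 shape_color = SHAPE_COLOURS[shape]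
--                 shape_cells = SHAPES[shape][0]
--                 min_x = min(x for x, _ in shape_cells) if shape_cells else 0
--                 max_x = max(x for x, _ in shape_cells) if shape_cells else 0
--                 min_y = min(y for _, y in shape_cells) if shape_cells else 0
--                 max_y = max(y for _, y in shape_cells) if shape_cells else 0
--                 offset_x = 1 - min_x + (1 - (max_x - min_x)) // 2
--                 offset_y = 1 - min_y + (1 - (max_y - min_y)) // 2
--                 for display_x in range(6):
--                     shape_x = display_x - offset_x - 1
--                     shape_y = local_y - offset_y
--                     if (shape_x, shape_y) in shape_cells:
--                         line += f'{shape_color}██{COLOURS["RESET"]}'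
--                     else:
--                         line += '░░'
--             else:
--                 line += '░░░░░░░░░░░░'
--         else:
--             line += '            '
--         display_lines.append(line)
--     return display_lines
--
-- HEIGHT = 20
--
-- SHAPES = {
--     1: [[(0,0), (1,0), (0,1), (1,1)]],
--     2: [[(0,0), (0,1), (0,2), (0,3)], [(0,0), (1,0), (2,0), (3,0)]],
--     3: [[(1,0), (0,1), (1,1), (2,1)], [(1,0), (0,1), (1,1), (1,2)], [(0,0), (1,0), (2,0), (1,1)], [(0,0), (0,1), (0,2), (1,1)]],
--     4: [[(1,0), (2,0), (0,1), (1,1)], [(0,0), (0,1), (1,1), (1,2)]],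
--     5: [[(0,0), (1,0), (1,1), (2,1)], [(1,0), (0,1), (1,1), (0,2)]],
--     6: [[(0,0), (0,1), (1,1), (2,1)], [(1,0), (2,0), (1,1), (1,2)], [(0,0), (1,0), (2,0), (2,1)], [(1,0), (1,1), (0,2), (1,2)]],
--     7: [[(2,0), (0,1), (1,1), (2,1)], [(1,0), (1,1), (1,2), (2,2)], [(0,0), (1,0), (2,0), (0,1)], [(0,0), (1,0), (1,1), (1,2)]]
-- }
--
-- COLOURS = {
--     'RED': '\033[91m',
--     'GREEN': '\033[92m',
--     'YELLOW': '\033[93m',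
--     'BLUE': '\033[94m',
--     'MAGENTA': '\033[95m',
--     'CYAN': '\033[96m',
--     'ORANGE': '\033[38;5;208m',
--     'WHITE': '\033[97m',
--     'RESET': '\033[0m'
-- }
--
-- SHAPE_COLOURS = {
--     1: COLOURS['YELLOW'],
--     2: COLOURS['CYAN'],
--     3: COLOURS['MAGENTA'],
--     4: COLOURS['GREEN'],
--     5: COLOURS['RED'],
--     6: COLOURS['BLUE'],
--     7: COLOURS['ORANGE']
-- }
-- ===== SOURCE B (Python) =====
-- HEIGHT = 20
--
-- SHAPES = {
--     1: [[(0,0), (1,0), (0,1), (1,1)]],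
--     2: [[(0,0), (0,1), (0,2), (0,3)], [(0,0), (1,0), (2,0), (3,0)]],
--     3: [[(1,0), (0,1), (1,1), (2,1)], [(1,0), (0,1), (1,1), (1,2)], [(0,0), (1,0), (2,0), (1,1)], [(0,0), (0,1), (0,2), (1,1)]],
--     4: [[(1,0), (2,0), (0,1), (1,1)], [(0,0), (0,1), (1,1), (1,2)]],
--     5: [[(0,0), (1,0), (1,1), (2,1)], [(1,0), (0,1), (1,1), (0,2)]],
--     6: [[(0,0), (0,1), (1,1), (2,1)], [(1,0), (2,0), (1,1), (1,2)], [(0,0), (1,0), (2,0), (2,1)], [(1,0), (1,1), (0,2), (1,2)]],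
--     7: [[(2,0), (0,1), (1,1), (2,1)], [(1,0), (1,1), (1,2), (2,2)], [(0,0), (1,0), (2,0), (0,1)], [(0,0), (1,0), (1,1), (1,2)]]
-- }
--
-- COLOURS = {
--     'RED': '\033[91m',
--     'GREEN': '\033[92m',
--     'YELLOW': '\033[93m',
--     'BLUE': '\033[94m',
--     'MAGENTA': '\033[95m',
--     'CYAN': '\033[96m',
--     'ORANGE': '\033[38;5;208m',
--     'WHITE': '\033[97m',
--     'RESET': '\033[0m'
-- }
--
-- SHAPE_COLOURS = {
--     1: COLOURS['YELLOW'],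
--     2: COLOURS['CYAN'],
--     3: COLOURS['MAGENTA'],
--     4: COLOURS['GREEN'],
--     5: COLOURS['RED'],
--     6: COLOURS['BLUE'],
--     7: COLOURS['ORANGE']
-- }
--
--
-- def render_queue_shapes(shape_queue):
--     """Plot each queued shape's cells into a 6x5 buffer instead of scanning
--     every display position for membership."""
--     canvas = []
--     for queue_index in range(3):
--         if queue_index < len(shape_queue):
--             shape = shape_queue[queue_index]
--             colour = SHAPE_COLOURS[shape]
--             cells = SHAPES[shape][0]
--             min_x = min(x for x, _ in cells)
--             max_x = max(x for x, _ in cells)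
--             min_y = min(y for _, y in cells)
--             max_y = max(y for _, y in cells)
--             offset_x = 1 - min_x + (1 - (max_x - min_x)) // 2
--             offset_y = 1 - min_y + (1 - (max_y - min_y)) // 2
--             token = colour + '\u2588\u2588' + COLOURS['RESET']
--             grid = [['\u2591\u2591'] * 6 for _ in range(5)]
--             for x, y in cells:
--                 col = x + offset_x + 1
--                 row = y + offset_y
--                 if 0 <= col < 6 and 0 <= row < 5:
--                     grid[row][col] = token
--             canvas.extend(''.join(r) for r in grid)
--         else:
--             canvas.extend(['\u2591\u2591' * 6] * 5)
--     # the queue window is 14 rows tall, so the last canvas row is cut off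
--     lines = ['    NEXT    '] + canvas[:14]
--     lines.extend(['            '] * (HEIGHT - len(lines)))
--     return lines
-- ===== Notes on version B (the rewrite author's own statement) =====
-- stated objective: alternative
-- what changed: B plots each queued shape's cells once into a 6x5 buffer per slot and assembles the display from sections (header, three blocks, padding), instead of A's per-position membership scan over every display cell.
import Mathlib
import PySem

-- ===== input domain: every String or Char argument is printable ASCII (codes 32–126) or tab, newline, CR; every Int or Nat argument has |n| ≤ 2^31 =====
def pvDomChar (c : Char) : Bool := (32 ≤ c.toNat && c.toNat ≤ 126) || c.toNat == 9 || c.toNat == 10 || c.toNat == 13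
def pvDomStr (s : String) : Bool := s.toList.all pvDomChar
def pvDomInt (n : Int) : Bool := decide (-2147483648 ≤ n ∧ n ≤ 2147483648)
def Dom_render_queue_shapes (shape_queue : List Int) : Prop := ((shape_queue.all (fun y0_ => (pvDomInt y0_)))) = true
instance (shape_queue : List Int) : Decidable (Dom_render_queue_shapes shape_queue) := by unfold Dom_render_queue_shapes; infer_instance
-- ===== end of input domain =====

-- B plots each shape's cells once into a 6x5 buffer per queue slot and assembles the
-- display from sections, instead of A's per-position membership scan; same return value.

-- shared module constants (SHAPES, SHAPE_COLOURS, COLOURS['RESET'])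
def pvRESET : String := "\x1b[0m"

def pvSHAPES : PySem.Dict Int (List (List (Int × Int))) := PySem.Dict.ofList [
  (1, [[(0,0), (1,0), (0,1), (1,1)]]),
  (2, [[(0,0), (0,1), (0,2), (0,3)], [(0,0), (1,0), (2,0), (3,0)]]),
  (3, [[(1,0), (0,1), (1,1), (2,1)], [(1,0), (0,1), (1,1), (1,2)], [(0,0), (1,0), (2,0), (1,1)], [(0,0), (0,1), (0,2), (1,1)]]),
  (4, [[(1,0), (2,0), (0,1), (1,1)], [(0,0), (0,1), (1,1), (1,2)]]),
  (5, [[(0,0), (1,0), (1,1), (2,1)], [(1,0), (0,1), (1,1), (0,2)]]),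
  (6, [[(0,0), (0,1), (1,1), (2,1)], [(1,0), (2,0), (1,1), (1,2)], [(0,0), (1,0), (2,0), (2,1)], [(1,0), (1,1), (0,2), (1,2)]]),
  (7, [[(2,0), (0,1), (1,1), (2,1)], [(1,0), (1,1), (1,2), (2,2)], [(0,0), (1,0), (2,0), (0,1)], [(0,0), (1,0), (1,1), (1,2)]])]

def pvSHAPE_COLOURS : PySem.Dict Int String := PySem.Dict.ofList [
  (1, "\x1b[93m"), (2, "\x1b[96m"), (3, "\x1b[95m"), (4, "\x1b[92m"),
  (5, "\x1b[91m"), (6, "\x1b[94m"), (7, "\x1b[38;5;208m")]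

-- ===== PORT A =====
-- body of A's 'queue_index < len(shape_queue)' branch, given the indexed shape and local_y
def renderSlotLine (shape : Int) (local_y : Int) : String :=
  let shape_color := PySem.Dict.getD pvSHAPE_COLOURS shape ""
  let shape_cells := PySem.List.pyGetD (PySem.Dict.getD pvSHAPES shape []) 0 []
  let min_x := if shape_cells ≠ [] then (PySem.List.min? (shape_cells.map Prod.fst) (fun x => x)).getD 0 else 0
  let max_x := if shape_cells ≠ [] then (PySem.List.max? (shape_cells.map Prod.fst) (fun x => x)).getD 0 else 0
  let min_y := if shape_cells ≠ [] then (PySem.List.min? (shape_cells.map Prod.snd) (fun x => x)).getD 0 else 0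
  let max_y := if shape_cells ≠ [] then (PySem.List.max? (shape_cells.map Prod.snd) (fun x => x)).getD 0 else 0
  let offset_x := 1 - min_x + PySem.Int.floordiv (1 - (max_x - min_x)) 2
  let offset_y := 1 - min_y + PySem.Int.floordiv (1 - (max_y - min_y)) 2
  (PySem.List.pyRange 0 6 1).foldl (fun line display_x =>
    let shape_x := display_x - offset_x - 1
    let shape_y := local_y - offset_y
    if shape_cells.contains (shape_x, shape_y) then
      line ++ (shape_color ++ "██" ++ pvRESET)
    else
      line ++ "░░") ""

def render_queue_shapes (shape_queue : List Int) : List String :=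
  (PySem.List.pyRange 0 20 1).foldl (fun display_lines display_y =>
    let line : String :=
      if display_y = 0 then "    NEXT    "
      else if 1 ≤ display_y ∧ display_y ≤ 14 then
        let queue_index := PySem.Int.floordiv (display_y - 1) 5
        let local_y := PySem.Int.mod (display_y - 1) 5
        if queue_index < (shape_queue.length : Int) then
          renderSlotLine (PySem.List.pyGetD shape_queue queue_index 0) local_y
        else "░░░░░░░░░░░░"
      else "            "
    display_lines ++ [line]) []

-- ===== PORT B =====
-- one queue slot: plot the shape's cells into a 5x6 buffer of '░░' tokens, then join rows
def plotBlock (shape : Int) : List String :=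
  let colour := PySem.Dict.getD pvSHAPE_COLOURS shape ""
  let cells := PySem.List.pyGetD (PySem.Dict.getD pvSHAPES shape []) 0 []
  let min_x := (PySem.List.min? (cells.map Prod.fst) (fun x => x)).getD 0
  let max_x := (PySem.List.max? (cells.map Prod.fst) (fun x => x)).getD 0
  let min_y := (PySem.List.min? (cells.map Prod.snd) (fun x => x)).getD 0
  let max_y := (PySem.List.max? (cells.map Prod.snd) (fun x => x)).getD 0
  let offset_x := 1 - min_x + PySem.Int.floordiv (1 - (max_x - min_x)) 2
  let offset_y := 1 - min_y + PySem.Int.floordiv (1 - (max_y - min_y)) 2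
  let token := colour ++ "██" ++ pvRESET
  let grid := cells.foldl (fun g c =>
      let col := c.1 + offset_x + 1
      let row := c.2 + offset_y
      if 0 ≤ col ∧ col < 6 ∧ 0 ≤ row ∧ row < 5 then
        g.set row.toNat ((g.getD row.toNat []).set col.toNat token)
      else g)
    (List.replicate 5 (List.replicate 6 "░░"))
  grid.map (fun r => PySem.Str.join "" r)

def render_queue_shapes_alt (shape_queue : List Int) : List String :=
  let canvas := (List.range 3).foldl (fun cv queue_index =>
    if queue_index < shape_queue.length then
      cv ++ plotBlock (PySem.List.pyGetD shape_queue (queue_index : Int) 0)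
    else
      cv ++ List.replicate 5 "░░░░░░░░░░░░") []
  -- the queue window is 14 rows tall, so the last canvas row is cut off
  let lines := "    NEXT    " :: canvas.take 14
  lines ++ List.replicate (20 - lines.length) "            "

-- ===== PRECONDITION & SPEC =====
-- Pre_ excludes queues whose first three entries contain a value outside 1..7: there A's
-- dict lookup SHAPE_COLOURS[shape] raises KeyError (and B raises the same way).
def Pre_render_queue_shapes (shape_queue : List Int) : Prop :=
  ∀ s ∈ shape_queue.take 3, 1 ≤ s ∧ s ≤ 7
instance (shape_queue : List Int) : Decidable (Pre_render_queue_shapes shape_queue) := by unfold Pre_render_queue_shapes; infer_instance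

def pvWitness_render_queue_shapes : List Int := [2, 5, 7, 1]

def Spec_render_queue_shapes (shape_queue : List Int) (out : List String) : Prop := out = render_queue_shapes_alt shape_queue
instance (shape_queue : List Int) (out : List String) : Decidable (Spec_render_queue_shapes shape_queue out) := by unfold Spec_render_queue_shapes; infer_instance

-- ===== CLAIM (what is proved, stated in full; the proofs are below) =====
def Claim_equal_render_queue_shapes : Prop := ∀ (shape_queue : List Int), Dom_render_queue_shapes shape_queue → Pre_render_queue_shapes shape_queue → Spec_render_queue_shapes shape_queue (render_queue_shapes shape_queue)

-- ===== LEMMAS AND PROOFS =====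

lemma block_eq (s : Int) (h1 : 1 ≤ s) (h2 : s ≤ 7) :
    plotBlock s = [renderSlotLine s 0, renderSlotLine s 1, renderSlotLine s 2,
      renderSlotLine s 3, renderSlotLine s 4] := by
  interval_cases s <;> decide

lemma main_nil : render_queue_shapes [] = render_queue_shapes_alt [] := by decide

lemma A_nf1 (a : Int) :
    render_queue_shapes [a] =
      "    NEXT    " :: [renderSlotLine a 0, renderSlotLine a 1, renderSlotLine a 2,
        renderSlotLine a 3, renderSlotLine a 4] ++
      ["░░░░░░░░░░░░", "░░░░░░░░░░░░", "░░░░░░░░░░░░", "░░░░░░░░░░░░", "░░░░░░░░░░░░",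
       "░░░░░░░░░░░░", "░░░░░░░░░░░░", "░░░░░░░░░░░░", "░░░░░░░░░░░░"] ++
      ["            ", "            ", "            ", "            ", "            "] := by
  simp only [render_queue_shapes]
  rw [show PySem.List.pyRange 0 20 1 = [0,1,2,3,4,5,6,7,8,9,10,11,12,13,14,15,16,17,18,19] from by decide]
  simp only [List.foldl]
  norm_num [PySem.Int.floordiv, PySem.Int.mod,
    show Int.fdiv 1 5 = 0 from by decide, show Int.fdiv 2 5 = 0 from by decide,
    show Int.fdiv 3 5 = 0 from by decide, show Int.fdiv 4 5 = 0 from by decide,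
    show Int.fdiv 5 5 = 1 from by decide, show Int.fdiv 6 5 = 1 from by decide,
    show Int.fdiv 7 5 = 1 from by decide, show Int.fdiv 8 5 = 1 from by decide,
    show Int.fdiv 9 5 = 1 from by decide, show Int.fdiv 10 5 = 2 from by decide,
    show Int.fdiv 11 5 = 2 from by decide, show Int.fdiv 12 5 = 2 from by decide,
    show Int.fdiv 13 5 = 2 from by decide,
    show Int.fmod 1 5 = 1 from by decide, show Int.fmod 2 5 = 2 from by decide,
    show Int.fmod 3 5 = 3 from by decide, show Int.fmod 4 5 = 4 from by decide,
    show Int.fmod 5 5 = 0 from by decide, show Int.fmod 6 5 = 1 from by decide,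
    show Int.fmod 7 5 = 2 from by decide, show Int.fmod 8 5 = 3 from by decide,
    show Int.fmod 9 5 = 4 from by decide, show Int.fmod 10 5 = 0 from by decide,
    show Int.fmod 11 5 = 1 from by decide, show Int.fmod 12 5 = 2 from by decide,
    show Int.fmod 13 5 = 3 from by decide,
    PySem.List.pyGetD_ofNat']

lemma A_nf2 (a b : Int) :
    render_queue_shapes [a, b] =
      "    NEXT    " :: [renderSlotLine a 0, renderSlotLine a 1, renderSlotLine a 2,
        renderSlotLine a 3, renderSlotLine a 4,
        renderSlotLine b 0, renderSlotLine b 1, renderSlotLine b 2,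
        renderSlotLine b 3, renderSlotLine b 4] ++
      ["░░░░░░░░░░░░", "░░░░░░░░░░░░", "░░░░░░░░░░░░", "░░░░░░░░░░░░"] ++
      ["            ", "            ", "            ", "            ", "            "] := by
  simp only [render_queue_shapes]
  rw [show PySem.List.pyRange 0 20 1 = [0,1,2,3,4,5,6,7,8,9,10,11,12,13,14,15,16,17,18,19] from by decide]
  simp only [List.foldl]
  norm_num [PySem.Int.floordiv, PySem.Int.mod,
    show Int.fdiv 1 5 = 0 from by decide, show Int.fdiv 2 5 = 0 from by decide,
    show Int.fdiv 3 5 = 0 from by decide, show Int.fdiv 4 5 = 0 from by decide,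
    show Int.fdiv 5 5 = 1 from by decide, show Int.fdiv 6 5 = 1 from by decide,
    show Int.fdiv 7 5 = 1 from by decide, show Int.fdiv 8 5 = 1 from by decide,
    show Int.fdiv 9 5 = 1 from by decide, show Int.fdiv 10 5 = 2 from by decide,
    show Int.fdiv 11 5 = 2 from by decide, show Int.fdiv 12 5 = 2 from by decide,
    show Int.fdiv 13 5 = 2 from by decide,
    show Int.fmod 1 5 = 1 from by decide, show Int.fmod 2 5 = 2 from by decide,
    show Int.fmod 3 5 = 3 from by decide, show Int.fmod 4 5 = 4 from by decide,
    show Int.fmod 5 5 = 0 from by decide, show Int.fmod 6 5 = 1 from by decide,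
    show Int.fmod 7 5 = 2 from by decide, show Int.fmod 8 5 = 3 from by decide,
    show Int.fmod 9 5 = 4 from by decide, show Int.fmod 10 5 = 0 from by decide,
    show Int.fmod 11 5 = 1 from by decide, show Int.fmod 12 5 = 2 from by decide,
    show Int.fmod 13 5 = 3 from by decide,
    PySem.List.pyGetD_ofNat']

lemma A_nf3 (a b c : Int) (t : List Int) :
    render_queue_shapes (a :: b :: c :: t) =
      "    NEXT    " :: [renderSlotLine a 0, renderSlotLine a 1, renderSlotLine a 2,
        renderSlotLine a 3, renderSlotLine a 4,
        renderSlotLine b 0, renderSlotLine b 1, renderSlotLine b 2,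
        renderSlotLine b 3, renderSlotLine b 4,
        renderSlotLine c 0, renderSlotLine c 1, renderSlotLine c 2, renderSlotLine c 3] ++
      ["            ", "            ", "            ", "            ", "            "] := by
  have h1 : (1:Int) ≤ ((b :: c :: t).length : Int) := by push_cast [List.length_cons]; omega
  have h2 : (2:Int) ≤ ((b :: c :: t).length : Int) := by push_cast [List.length_cons]; omega
  have h0 : (0:Int) ≤ ((b :: c :: t).length : Int) := by push_cast [List.length_cons]; omega
  have hn : 0 < (b :: c :: t).length := by simp
  simp only [render_queue_shapes]
  rw [show PySem.List.pyRange 0 20 1 = [0,1,2,3,4,5,6,7,8,9,10,11,12,13,14,15,16,17,18,19] from by decide]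
  simp only [List.foldl]
  norm_num [PySem.Int.floordiv, PySem.Int.mod,
    show Int.fdiv 1 5 = 0 from by decide, show Int.fdiv 2 5 = 0 from by decide,
    show Int.fdiv 3 5 = 0 from by decide, show Int.fdiv 4 5 = 0 from by decide,
    show Int.fdiv 5 5 = 1 from by decide, show Int.fdiv 6 5 = 1 from by decide,
    show Int.fdiv 7 5 = 1 from by decide, show Int.fdiv 8 5 = 1 from by decide,
    show Int.fdiv 9 5 = 1 from by decide, show Int.fdiv 10 5 = 2 from by decide,
    show Int.fdiv 11 5 = 2 from by decide, show Int.fdiv 12 5 = 2 from by decide,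
    show Int.fdiv 13 5 = 2 from by decide,
    show Int.fmod 1 5 = 1 from by decide, show Int.fmod 2 5 = 2 from by decide,
    show Int.fmod 3 5 = 3 from by decide, show Int.fmod 4 5 = 4 from by decide,
    show Int.fmod 5 5 = 0 from by decide, show Int.fmod 6 5 = 1 from by decide,
    show Int.fmod 7 5 = 2 from by decide, show Int.fmod 8 5 = 3 from by decide,
    show Int.fmod 9 5 = 4 from by decide, show Int.fmod 10 5 = 0 from by decide,
    show Int.fmod 11 5 = 1 from by decide, show Int.fmod 12 5 = 2 from by decide,
    show Int.fmod 13 5 = 3 from by decide,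
    h0, h1, h2, hn, PySem.List.pyGetD_ofNat']
  have k1 : (0:Int) ≤ ↑t.length + 1 := by omega
  have k2 : (2:Int) ≤ ↑t.length + 1 + 1 := by omega
  have k3 : ¬(↑t.length + 1 + 1 < (0:Int)) := by omega
  norm_num [k1, k2, k3, PySem.List.pyGetD_ofNat']

lemma B_nf1 (a : Int) (ha1 : 1 ≤ a) (ha2 : a ≤ 7) :
    render_queue_shapes_alt [a] =
      "    NEXT    " :: [renderSlotLine a 0, renderSlotLine a 1, renderSlotLine a 2,
        renderSlotLine a 3, renderSlotLine a 4] ++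
      ["░░░░░░░░░░░░", "░░░░░░░░░░░░", "░░░░░░░░░░░░", "░░░░░░░░░░░░", "░░░░░░░░░░░░",
       "░░░░░░░░░░░░", "░░░░░░░░░░░░", "░░░░░░░░░░░░", "░░░░░░░░░░░░"] ++
      ["            ", "            ", "            ", "            ", "            "] := by
  simp only [render_queue_shapes_alt]
  rw [show List.range 3 = [0,1,2] from by decide]
  simp only [List.foldl]
  norm_num [PySem.List.pyGetD_ofNat', block_eq a ha1 ha2, List.replicate]

lemma B_nf2 (a b : Int) (ha1 : 1 ≤ a) (ha2 : a ≤ 7) (hb1 : 1 ≤ b) (hb2 : b ≤ 7) :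
    render_queue_shapes_alt [a, b] =
      "    NEXT    " :: [renderSlotLine a 0, renderSlotLine a 1, renderSlotLine a 2,
        renderSlotLine a 3, renderSlotLine a 4,
        renderSlotLine b 0, renderSlotLine b 1, renderSlotLine b 2,
        renderSlotLine b 3, renderSlotLine b 4] ++
      ["░░░░░░░░░░░░", "░░░░░░░░░░░░", "░░░░░░░░░░░░", "░░░░░░░░░░░░"] ++
      ["            ", "            ", "            ", "            ", "            "] := by
  simp only [render_queue_shapes_alt]
  rw [show List.range 3 = [0,1,2] from by decide]
  simp only [List.foldl]
  norm_num [PySem.List.pyGetD_ofNat', block_eq a ha1 ha2, block_eq b hb1 hb2, List.replicate]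

lemma B_nf3 (a b c : Int) (t : List Int) (ha1 : 1 ≤ a) (ha2 : a ≤ 7) (hb1 : 1 ≤ b) (hb2 : b ≤ 7)
    (hc1 : 1 ≤ c) (hc2 : c ≤ 7) :
    render_queue_shapes_alt (a :: b :: c :: t) =
      "    NEXT    " :: [renderSlotLine a 0, renderSlotLine a 1, renderSlotLine a 2,
        renderSlotLine a 3, renderSlotLine a 4,
        renderSlotLine b 0, renderSlotLine b 1, renderSlotLine b 2,
        renderSlotLine b 3, renderSlotLine b 4,
        renderSlotLine c 0, renderSlotLine c 1, renderSlotLine c 2, renderSlotLine c 3] ++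
      ["            ", "            ", "            ", "            ", "            "] := by
  have m0 : 0 < (a :: b :: c :: t).length := by simp
  have m1 : 1 < (a :: b :: c :: t).length := by simp only [List.length_cons]; omega
  have m2 : 2 < (a :: b :: c :: t).length := by simp only [List.length_cons]; omega
  simp only [render_queue_shapes_alt]
  rw [show List.range 3 = [0,1,2] from by decide]
  simp only [List.foldl]
  norm_num [m0, m1, m2, PySem.List.pyGetD_ofNat',
    block_eq a ha1 ha2, block_eq b hb1 hb2, block_eq c hc1 hc2, List.replicate]

-- ===== VERDICT (by name: the statement is the Claim_ definition above) =====
theorem render_queue_shapes_spec : Claim_equal_render_queue_shapes := by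
  intro sq _ hpre
  unfold Spec_render_queue_shapes
  match sq with
  | [] => exact main_nil
  | [a] =>
    obtain ⟨ha1, ha2⟩ := hpre a (by simp [List.take])
    rw [A_nf1, B_nf1 a ha1 ha2]
  | [a, b] =>
    obtain ⟨ha1, ha2⟩ := hpre a (by simp [List.take])
    obtain ⟨hb1, hb2⟩ := hpre b (by simp [List.take])
    rw [A_nf2, B_nf2 a b ha1 ha2 hb1 hb2]
  | a :: b :: c :: t =>
    obtain ⟨ha1, ha2⟩ := hpre a (by simp [List.take])
    obtain ⟨hb1, hb2⟩ := hpre b (by simp [List.take])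
    obtain ⟨hc1, hc2⟩ := hpre c (by simp [List.take])
    rw [A_nf3, B_nf3 a b c t ha1 ha2 hb1 hb2 hc1 hc2]
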